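-- pv_equiv track=rewrite | github.com/daniellozuz/Project-Euler | Problem79/problem79.py | insert_in_every
-- ===== SOURCE A (Python) =====
-- def insert_in_every(number, key):
--     new_number = ''
--     for n in number:
--         if n in key:
--             new_number += key
--         else:
--             new_number += n
--     return new_number
-- ===== SOURCE B (Python) =====
-- def insert_in_every(number, key):
--     keyset = set(key)
--     pieces = []
--     rest = number
--     while True:
--         idx = -1
--         for i, c in enumerate(rest):
--             if c in keyset:
--                 idx = i
--                 break
--         if idx < 0:
--             pieces.append(rest)
--             break
--         pieces.append(rest[:idx])
--         pieces.append(key)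
--         rest = rest[idx + 1:]
--     return ''.join(pieces)
-- ===== Notes on version B (the rewrite author's own statement) =====
-- stated objective: alternative
-- what changed: B repeatedly searches for the next character belonging to set(key) and emits the untouched slice before it plus one copy of key, joining the collected pieces at the end, instead of A's per-character loop that tests substring membership and concatenates the growing result one character at a time.
import Mathlib
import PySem

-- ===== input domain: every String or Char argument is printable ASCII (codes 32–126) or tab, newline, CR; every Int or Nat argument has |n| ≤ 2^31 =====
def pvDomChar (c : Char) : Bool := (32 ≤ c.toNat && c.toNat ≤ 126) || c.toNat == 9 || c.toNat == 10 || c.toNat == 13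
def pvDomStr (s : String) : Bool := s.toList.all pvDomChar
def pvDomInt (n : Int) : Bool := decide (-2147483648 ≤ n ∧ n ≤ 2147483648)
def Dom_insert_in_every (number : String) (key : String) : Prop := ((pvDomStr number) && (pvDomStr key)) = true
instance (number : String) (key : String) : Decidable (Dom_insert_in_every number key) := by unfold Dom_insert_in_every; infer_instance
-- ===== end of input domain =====

-- B replaces A's per-character loop (substring test + char-by-char concatenation) by
-- repeated search-and-split: find the next key character, emit the untouched slice and
-- one copy of key, join the pieces at the end (alternative decomposition; same results).

-- ===== PORT A =====
-- A: accumulate new_number char by char; 'n in key' on a 1-char n is membership in key's chars.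
def insert_in_every (number : String) (key : String) : String :=
  String.ofList (number.toList.foldl
    (fun acc n => if key.toList.contains n then acc ++ key.toList else acc ++ [n]) [])

-- ===== PORT B =====
-- B's inner for/enumerate/break: index of the first char of rest that is in keyset (none = idx stays -1)
def pvFindKeyIdx (ks : PySem.Set Char) : List Char → Nat → Option Nat
  | [], _ => none
  | c :: rest, i => if PySem.Set.contains ks c then some i else pvFindKeyIdx ks rest (i + 1)

-- B's while loop: rest[:idx] / rest[idx+1:] are the nonneg in-range slices take idx / drop (idx+1)
def pvSplitLoop (key : List Char) (ks : PySem.Set Char)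
    (rest : List Char) (pieces : List (List Char)) : List (List Char) :=
  match h : pvFindKeyIdx ks rest 0 with
  | none => pieces ++ [rest]
  | some idx => pvSplitLoop key ks (rest.drop (idx + 1)) (pieces ++ [rest.take idx, key])
termination_by rest.length
decreasing_by
  cases rest with
  | nil => simp [pvFindKeyIdx] at h
  | cons a l => simp only [List.length_drop, List.length_cons]; omega

-- keyset = set(key); ''.join(pieces) = flatten
def insert_in_every_alt (number : String) (key : String) : String :=
  String.ofList (pvSplitLoop key.toList (PySem.Set.ofList key.toList) number.toList []).flatten

-- ===== PRECONDITION & SPEC =====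
def Spec_insert_in_every (number : String) (key : String) (out : String) : Prop := out = insert_in_every_alt number key
instance (number : String) (key : String) (out : String) : Decidable (Spec_insert_in_every number key out) := by unfold Spec_insert_in_every; infer_instance

-- ===== CLAIM (what is proved, stated in full; the proofs are below) =====
def Claim_equal_insert_in_every : Prop := ∀ (number : String) (key : String), Dom_insert_in_every number key → Spec_insert_in_every number key (insert_in_every number key)

-- ===== LEMMAS AND PROOFS =====

-- if the search finds nothing, no char of l is in ks
theorem pvFindKeyIdx_none (ks : PySem.Set Char) (l : List Char) (i : Nat)
    (h : pvFindKeyIdx ks l i = none) : ∀ c ∈ l, c ∉ ks := by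
  induction l generalizing i with
  | nil => simp
  | cons a rest ih =>
    simp only [pvFindKeyIdx] at h
    by_cases ha : a ∈ ks
    · simp [ha] at h
    · rw [if_neg (by simpa using ha)] at h
      intro c hc
      rcases List.mem_cons.mp hc with rfl | hc
      · exact ha
      · exact ih (i + 1) h c hc

-- shift the starting index of the search
theorem pvFindKeyIdx_shift (ks : PySem.Set Char) (l : List Char) (i : Nat) :
    pvFindKeyIdx ks l (i + 1) = Option.map (· + 1) (pvFindKeyIdx ks l i) := by
  induction l generalizing i with
  | nil => simp [pvFindKeyIdx]
  | cons a rest ih =>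
    by_cases ha : a ∈ ks <;> simp [pvFindKeyIdx, ha, ih]

-- a run without key chars is left unchanged by A's per-char expansion
theorem flatMap_id_of_none (key : List Char) (l : List Char)
    (h : ∀ c ∈ l, c ∉ key) :
    l.flatMap (fun c => if key.contains c then key else [c]) = l := by
  induction l with
  | nil => simp
  | cons a rest ih =>
    have hna : a ∉ key := h a (by simp)
    simp only [List.flatMap_cons]
    rw [if_neg (by simpa using hna), ih (fun c hc => h c (by simp [hc]))]
    simp

-- A's per-char expansion of l splits at the first found key char
theorem flatMap_split (key : List Char) (ks : PySem.Set Char)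
    (hks : ∀ c, c ∈ ks ↔ c ∈ key)
    (l : List Char) (idx : Nat) (h : pvFindKeyIdx ks l 0 = some idx) :
    l.flatMap (fun c => if key.contains c then key else [c])
      = l.take idx ++ key ++ (l.drop (idx + 1)).flatMap (fun c => if key.contains c then key else [c]) := by
  induction l generalizing idx with
  | nil => simp [pvFindKeyIdx] at h
  | cons a rest ih =>
    simp only [pvFindKeyIdx] at h
    by_cases ha : a ∈ ks
    · rw [if_pos (by simpa using ha)] at h
      obtain rfl : idx = 0 := (Option.some.inj h).symm
      have hmem : a ∈ key := (hks a).mp ha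
      simp only [List.flatMap_cons, List.take_zero, List.drop_succ_cons, List.drop_zero,
        List.nil_append]
      rw [if_pos (by simpa using hmem)]
    · rw [if_neg (by simpa using ha), pvFindKeyIdx_shift] at h
      cases hidx : pvFindKeyIdx ks rest 0 with
      | none => rw [hidx] at h; simp at h
      | some j =>
        rw [hidx] at h
        simp only [Option.map_some] at h
        obtain rfl : idx = j + 1 := (Option.some.inj h).symm
        have hna : a ∉ key := fun hm => ha ((hks a).mpr hm)
        simp only [List.flatMap_cons, List.take_succ_cons, List.drop_succ_cons]
        rw [if_neg (by simpa using hna), ih j hidx]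
        simp

-- the loop's flattened pieces are the already-collected pieces plus A's expansion of rest
theorem pvSplitLoop_flatten (key : List Char) (ks : PySem.Set Char)
    (hks : ∀ c, c ∈ ks ↔ c ∈ key) :
    ∀ rest pieces, (pvSplitLoop key ks rest pieces).flatten
      = pieces.flatten ++ rest.flatMap (fun c => if key.contains c then key else [c]) := by
  intro rest
  induction hr : rest.length using Nat.strong_induction_on generalizing rest with
  | _ n ih =>
    intro pieces
    rw [pvSplitLoop]
    cases h : pvFindKeyIdx ks rest 0 with
    | none =>
      have hno : ∀ c ∈ rest, c ∉ key :=
        fun c hc hm => pvFindKeyIdx_none ks rest 0 h c hc ((hks c).mpr hm)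
      rw [flatMap_id_of_none key rest hno]
      simp
    | some idx =>
      have hrest : rest ≠ [] := by rintro rfl; simp [pvFindKeyIdx] at h
      have hpos : 0 < rest.length := List.length_pos_of_ne_nil hrest
      have hlt : (rest.drop (idx + 1)).length < n := by
        subst hr; simp only [List.length_drop]; omega
      rw [ih _ hlt _ rfl, flatMap_split key ks hks rest idx h]
      simp

-- A's foldl accumulates exactly the flatMap expansion
theorem foldl_flatMap (key : List Char) (l : List Char) (acc : List Char) :
    l.foldl (fun acc n => if key.contains n then acc ++ key else acc ++ [n]) acc
      = acc ++ l.flatMap (fun c => if key.contains c then key else [c]) := by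
  induction l generalizing acc with
  | nil => simp
  | cons a rest ih =>
    simp only [List.foldl_cons, List.flatMap_cons]
    rw [ih]
    by_cases h : a ∈ key
    · rw [if_pos (by simpa using h), if_pos (by simpa using h), List.append_assoc]
    · rw [if_neg (by simpa using h), if_neg (by simpa using h), List.append_assoc]

-- ===== VERDICT (by name: the statement is the Claim_ definition above) =====
theorem insert_in_every_spec : Claim_equal_insert_in_every := by
  intro number key _
  unfold Spec_insert_in_every insert_in_every insert_in_every_alt
  rw [foldl_flatMap,
    pvSplitLoop_flatten key.toList (PySem.Set.ofList key.toList)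
      (fun c => by simp [PySem.Set.mem_ofList])]
  simp
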